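-- pv_equiv track=rewrite | github.com/isabel-tech/isabel-tech-python | function/Segmentacao_de_Clientes/exercicios_gabarito (1).py | analisar_texto
-- ===== SOURCE A (Python) =====
-- def analisar_texto(texto):
--
--     palavras = texto.split()  # separa com base em espaços
--     contagem_palavras = len(palavras)
--     frequencia_palavras = {}
--     frequencia_letras = {}
--
--     for palavra in palavras:
--         # abaixo, o get verificará se existe a palavra no dicionário. Não havendo, atribui o valor 0 e soma 1
--         frequencia_palavras[palavra] = frequencia_palavras.get(palavra, 0) + 1
--         for letra in palavra.lower():
--             # abaixo, o get verificará se existe a letra no dicionário. Não havendo, atribui o valor 0 e soma 1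
--             frequencia_letras[letra] = frequencia_letras.get(letra, 0) + 1
--
--     return contagem_palavras, frequencia_palavras, frequencia_letras
-- ===== SOURCE B (Python) =====
-- def analisar_texto(texto):
--     palavras = texto.split()
--     letras = "".join(palavras).lower()
--     frequencia_palavras = {w: palavras.count(w) for w in dict.fromkeys(palavras)}
--     frequencia_letras = {c: letras.count(c) for c in dict.fromkeys(letras)}
--     return len(palavras), frequencia_palavras, frequencia_letras
-- ===== Notes on version B (the rewrite author's own statement) =====
-- stated objective: alternative
-- what changed: A accumulates two frequency dicts incrementally inside one interleaved nested loop; B first deduplicates the words (resp. the lowercased concatenated letters) in first-seen order and then builds each dict by an independent count-scan per distinct key (dedupe-then-count comprehensions, no incremental accumulator).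
import Mathlib
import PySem

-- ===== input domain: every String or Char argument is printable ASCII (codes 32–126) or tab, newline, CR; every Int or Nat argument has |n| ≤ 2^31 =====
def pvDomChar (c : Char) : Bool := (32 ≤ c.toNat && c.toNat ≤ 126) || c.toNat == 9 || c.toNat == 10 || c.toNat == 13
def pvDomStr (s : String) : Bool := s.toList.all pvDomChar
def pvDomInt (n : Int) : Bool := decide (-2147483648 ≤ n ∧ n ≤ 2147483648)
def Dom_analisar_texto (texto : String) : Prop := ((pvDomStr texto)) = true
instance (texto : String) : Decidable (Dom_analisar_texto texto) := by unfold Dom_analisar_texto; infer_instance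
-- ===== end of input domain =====

-- B replaces A's incremental interleaved counting loop by dedupe-then-count:
-- the distinct keys in first-seen order, each paired with a full count-scan (alternative decomposition, not faster).

-- ===== PORT A =====
def analisar_texto (texto : String) : Int × (List (String × Int)) × (List (String × Int)) :=
  let palavras := PySem.Str.split₀ texto
  let contagem_palavras : Int := palavras.length
  let res := palavras.foldl
    (fun (st : PySem.Dict String Int × PySem.Dict String Int) palavra =>
      (st.1.insert palavra (st.1.getD palavra 0 + 1),
       (PySem.Str.lower palavra).toList.foldl
         (fun d letra => d.insert (String.ofList [letra]) (d.getD (String.ofList [letra]) 0 + 1)) st.2))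
    (PySem.Dict.empty, PySem.Dict.empty)
  (contagem_palavras, res.1.items, res.2.items)

-- ===== PORT B =====
-- In Python iterating a string yields 1-character strings; 'letras' is ported as that list of
-- 1-character strings, so dict.fromkeys (= PySem.List.dedup) and str.count (= List.count of a
-- single character) are exact.
def analisar_texto_alt (texto : String) : Int × (List (String × Int)) × (List (String × Int)) :=
  let palavras := PySem.Str.split₀ texto
  let letras := (PySem.Str.lower (PySem.Str.join "" palavras)).toList.map (fun c => String.ofList [c])
  ((palavras.length : Int),
   (PySem.List.dedup palavras).map (fun w => (w, (palavras.count w : Int))),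
   (PySem.List.dedup letras).map (fun c => (c, (letras.count c : Int))))

-- ===== PRECONDITION & SPEC =====
def Spec_analisar_texto (texto : String) (out : Int × (List (String × Int)) × (List (String × Int))) : Prop := out = analisar_texto_alt texto
instance (texto : String) (out : Int × (List (String × Int)) × (List (String × Int))) : Decidable (Spec_analisar_texto texto out) := by unfold Spec_analisar_texto; infer_instance

-- ===== CLAIM (what is proved, stated in full; the proofs are below) =====
def Claim_equal_analisar_texto : Prop := ∀ (texto : String), Dom_analisar_texto texto → Spec_analisar_texto texto (analisar_texto texto)

-- ===== LEMMAS AND PROOFS =====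

-- A fold over a product with componentwise step splits into two folds.
theorem pvFoldl_pair {α β γ : Type} (f : β → α → β) (g : γ → α → γ) :
    ∀ (l : List α) (b : β) (c : γ),
      l.foldl (fun st a => (f st.1 a, g st.2 a)) (b, c) = (l.foldl f b, l.foldl g c) := by
  intro l
  induction l with
  | nil => intro b c; rfl
  | cons x t ih => intro b c; simpa using ih (f b x) (g c x)

theorem pvJoin_nil (xss : List (List Char)) : PySem.Chars.join [] xss = xss.flatten := by
  simp [PySem.Chars.join, List.intercalate]
  induction xss with
  | nil => rfl
  | cons x t ih => cases t <;> simp_all [List.intersperse]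

-- The lowercased concatenation of the words is the concatenation of the lowercased words.
theorem pvLetras_eq (ws : List String) :
    (PySem.Str.lower (PySem.Str.join "" ws)).toList
      = (ws.map (fun w => (PySem.Str.lower w).toList)).flatten := by
  rw [PySem.Str.toList_lower, PySem.Str.toList_join]
  show PySem.Chars.lower (PySem.Chars.join [] (ws.map String.toList)) = _
  rw [pvJoin_nil]
  simp only [PySem.Chars.lower, List.map_flatten, List.map_map, PySem.Str.toList_lower, Function.comp_def]

-- A's incremental counting fold is Counter, whose items are dedupe-then-count.
theorem pvCounter_items {κ : Type} [BEq κ] [LawfulBEq κ] (xs : List κ) :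
    (xs.foldl (fun d x => d.insert x (d.getD x 0 + 1)) PySem.Dict.empty).items
      = (PySem.List.dedup xs).map (fun k => (k, (xs.count k : Int))) := by
  rw [PySem.Dict.foldl_insert_getD_add_one_eq_counter, PySem.Dict.items_counter]
  simp [PySem.List.dedup_eq_ofList]

-- ===== VERDICT (by name: the statement is the Claim_ definition above) =====
theorem analisar_texto_spec : Claim_equal_analisar_texto := by
  intro texto _
  show analisar_texto texto = analisar_texto_alt texto
  unfold analisar_texto analisar_texto_alt
  dsimp only
  rw [pvFoldl_pair
        (fun (d : PySem.Dict String Int) palavra => d.insert palavra (d.getD palavra 0 + 1))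
        (fun (d : PySem.Dict String Int) palavra =>
          (PySem.Str.lower palavra).toList.foldl
            (fun d letra => d.insert (String.ofList [letra]) (d.getD (String.ofList [letra]) 0 + 1)) d)]
  refine congrArg _ (congrArg₂ Prod.mk ?_ ?_)
  · rw [pvCounter_items]
  · rw [pvLetras_eq, List.map_flatten, List.map_map, ← pvCounter_items]
    simp only [List.foldl_flatten, List.foldl_map, Function.comp_def]
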